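-- pv_equiv track=rewrite | github.com/tedhabeck/mcp-context-forge | tests/jmeter/render_fragments.py | replace_marker_block
-- ===== SOURCE A (Python) =====
-- from typing import Iterable, List
--
-- def replace_marker_block(
--     lines: List[str],
--     marker: str,
--     block_lines: List[str],
-- ) -> List[str]:
--     out: List[str] = []
--     i = 0
--     while i < len(lines):
--         line = lines[i]
--         if line.strip() == marker:
--             indent = line.split("<")[0]
--             out.append(line)
--             out.extend([indent + l if l else "" for l in block_lines])
--             # Skip until after the IncludeController hashTree
--             i += 1
--             while i < len(lines):
--                 if lines[i].strip() == "<hashTree/>":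
--                     i += 1
--                     break
--                 i += 1
--             continue
--         out.append(line)
--         i += 1
--     return out
-- ===== SOURCE B (Python) =====
-- def _find(xs, target):
--     for k, x in enumerate(xs):
--         if x.strip() == target:
--             return k
--     return None
--
--
-- def replace_marker_block(lines, marker, block_lines):
--     out = []
--     rest = lines
--     i = _find(rest, marker)
--     while i is not None:
--         line = rest[i]
--         indent = line.split("<")[0]
--         out += rest[:i + 1]
--         out += [indent + l if l else "" for l in block_lines]
--         j = _find(rest[i + 1:], "<hashTree/>")
--         rest = rest[i + 2 + j:] if j is not None else []
--         i = _find(rest, marker)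
--     return out + rest
-- ===== Notes on version B (the rewrite author's own statement) =====
-- stated objective: alternative
-- what changed: Replaces A's per-line state-machine scan (outer index loop with a nested skipping loop) by a search-and-slice strategy: repeatedly locate the next marker with a find helper, emit the whole prefix slice plus the indented block at once, locate the <hashTree/> sentinel, and slice off everything up to and including it.
import Mathlib
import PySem

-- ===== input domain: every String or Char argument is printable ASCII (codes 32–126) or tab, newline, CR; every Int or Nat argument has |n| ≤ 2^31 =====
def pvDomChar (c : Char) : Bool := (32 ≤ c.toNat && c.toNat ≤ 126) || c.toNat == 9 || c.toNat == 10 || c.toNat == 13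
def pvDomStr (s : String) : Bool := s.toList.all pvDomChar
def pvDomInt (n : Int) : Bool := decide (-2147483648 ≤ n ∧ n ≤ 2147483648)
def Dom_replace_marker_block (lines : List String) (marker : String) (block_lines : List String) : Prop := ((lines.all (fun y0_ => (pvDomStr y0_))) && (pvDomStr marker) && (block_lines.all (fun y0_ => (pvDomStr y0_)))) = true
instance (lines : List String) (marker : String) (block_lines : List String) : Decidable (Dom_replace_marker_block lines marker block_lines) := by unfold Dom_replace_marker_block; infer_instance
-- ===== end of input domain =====

-- B replaces A's per-line state-machine scan by a search-and-slice strategy (repeated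
-- marker/sentinel search plus whole-slice emission); objective: alternative decomposition.
-- (The fuel parameters below only make the while loops total; they are always sufficient.)

-- ===== PORT A =====
-- inner while: advance i until just past a line stripping to "<hashTree/>" (or to the end)
def pvSkipA (lines : List String) : Nat → Nat → Nat
  | 0, i => i
  | f + 1, i =>
    if h : i < lines.length then
      if PySem.Str.strip lines[i] == "<hashTree/>" then i + 1
      else pvSkipA lines f (i + 1)
    else i

def pvLoopA (lines : List String) (marker : String) (block_lines : List String) : Nat → Nat → List String
  | 0, _ => []
  | f + 1, i =>
    if h : i < lines.length then
      let line := lines[i]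
      if PySem.Str.strip line == marker then
        -- line.split("<")[0]: split? with a nonempty separator always yields a nonempty list,
        -- so the Python [0] never raises; headD "" is exact here
        let indent := ((PySem.Str.split? line "<").getD []).headD ""
        (line :: block_lines.map (fun l => if l ≠ "" then indent ++ l else "")) ++
          pvLoopA lines marker block_lines f (pvSkipA lines lines.length (i + 1))
      else
        line :: pvLoopA lines marker block_lines f (i + 1)
    else []

def replace_marker_block (lines : List String) (marker : String) (block_lines : List String) : List String :=
  pvLoopA lines marker block_lines lines.length 0

-- ===== PORT B =====
-- _find: first index whose strip equals target, None if absent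
def pvFind : List String → String → Option Nat
  | [], _ => none
  | x :: xs, t => if PySem.Str.strip x == t then some 0 else (pvFind xs t).map (· + 1)

-- the Python while loop: find marker, emit prefix slice + block, find sentinel, slice rest
def pvLoopB (marker : String) (bl : List String) : Nat → List String → List String → List String
  | 0, out, rest => out ++ rest
  | f + 1, out, rest =>
    match pvFind rest marker with
    | none => out ++ rest
    | some i =>
      -- line = rest[i]; _find guarantees i < len(rest), so headD-of-drop is exact here
      let line := (rest.drop i).headD ""
      let indent := ((PySem.Str.split? line "<").getD []).headD ""
      let out' := out ++ rest.take (i + 1) ++ bl.map (fun l => if l ≠ "" then indent ++ l else "")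
      match pvFind (rest.drop (i + 1)) "<hashTree/>" with
      | some j => pvLoopB marker bl f out' (rest.drop (i + 2 + j))
      | none => pvLoopB marker bl f out' []

def replace_marker_block_alt (lines : List String) (marker : String) (block_lines : List String) : List String :=
  pvLoopB marker block_lines (lines.length + 1) [] lines

-- ===== PRECONDITION & SPEC =====
def Spec_replace_marker_block (lines : List String) (marker : String) (block_lines : List String) (out : List String) : Prop := out = replace_marker_block_alt lines marker block_lines
instance (lines : List String) (marker : String) (block_lines : List String) (out : List String) : Decidable (Spec_replace_marker_block lines marker block_lines out) := by unfold Spec_replace_marker_block; infer_instance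

-- ===== CLAIM (what is proved, stated in full; the proofs are below) =====
def Claim_equal_replace_marker_block : Prop := ∀ (lines : List String) (marker : String) (block_lines : List String), Dom_replace_marker_block lines marker block_lines → Spec_replace_marker_block lines marker block_lines (replace_marker_block lines marker block_lines)

-- ===== LEMMAS AND PROOFS =====

-- reference function: structural recursion both loops are proved equal to
def pvSkipF : List String → List String
  | [] => []
  | y :: ys => if PySem.Str.strip y == "<hashTree/>" then ys else pvSkipF ys

theorem pvSkipF_len (xs : List String) : (pvSkipF xs).length ≤ xs.length := by
  induction xs with
  | nil => simp [pvSkipF]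
  | cons y ys ih => unfold pvSkipF; split <;> simp <;> omega

def pvBlock (bl : List String) (line : String) : List String :=
  bl.map (fun l => if l ≠ "" then ((PySem.Str.split? line "<").getD []).headD "" ++ l else "")

def pvRef (marker : String) (bl : List String) : List String → List String
  | [] => []
  | x :: xs =>
    if PySem.Str.strip x == marker then
      (x :: pvBlock bl x) ++ pvRef marker bl (pvSkipF xs)
    else x :: pvRef marker bl xs
termination_by xs => xs.length
decreasing_by
  · have := pvSkipF_len xs; simp; omega
  · simp

theorem pvFind_some_lt {xs : List String} {t : String} {i : Nat}
    (h : pvFind xs t = some i) : i < xs.length := by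
  induction xs generalizing i with
  | nil => simp [pvFind] at h
  | cons x xs ih =>
    simp only [pvFind] at h
    split at h
    · simp only [Option.some.injEq] at h; subst h; simp
    · cases hx : pvFind xs t with
      | none => simp [hx] at h
      | some k => simp [hx] at h; have := ih hx; simp; omega

theorem pvSkipA_ge (lines : List String) (f i : Nat) : i ≤ pvSkipA lines f i := by
  induction f generalizing i with
  | zero => simp [pvSkipA]
  | succ f ih =>
    rw [pvSkipA]
    split
    · split
      · omega
      · have := ih (i + 1); omega
    · omega

-- A's inner while = pvSkipF on the suffix (given sufficient fuel)
theorem pvSkipA_eq (lines : List String) (f i : Nat) (hf : lines.length - i ≤ f) :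
    lines.drop (pvSkipA lines f i) = pvSkipF (lines.drop i) := by
  induction f generalizing i with
  | zero =>
    have h : ¬ i < lines.length := by omega
    rw [show pvSkipA lines 0 i = i from rfl, List.drop_eq_nil_of_le (by omega)]
    simp [pvSkipF]
  | succ f ih =>
    by_cases h : i < lines.length
    · rw [pvSkipA]
      simp only [h, dif_pos]
      rw [List.drop_eq_getElem_cons h, pvSkipF]
      split_ifs with hc
      · rfl
      · exact ih (i + 1) (by omega)
    · have heq : pvSkipA lines (f + 1) i = i := by rw [pvSkipA]; simp [h]
      rw [heq, List.drop_eq_nil_of_le (by omega)]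
      simp [pvSkipF]

-- A's outer loop = pvRef on the suffix (given sufficient fuel)
theorem pvLoopA_eq (lines : List String) (marker : String) (bl : List String)
    (f i : Nat) (hf : lines.length - i ≤ f) :
    pvLoopA lines marker bl f i = pvRef marker bl (lines.drop i) := by
  induction f generalizing i with
  | zero =>
    have h : ¬ i < lines.length := by omega
    rw [pvLoopA, List.drop_eq_nil_of_le (by omega), pvRef]
  | succ f ih =>
    by_cases h : i < lines.length
    · rw [pvLoopA]
      simp only [h, dif_pos]
      rw [List.drop_eq_getElem_cons h, pvRef]
      split_ifs with hc
      · rw [ih (pvSkipA lines lines.length (i + 1))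
            (by have := pvSkipA_ge lines lines.length (i + 1); omega),
          pvSkipA_eq lines lines.length (i + 1) (by omega)]
        simp [pvBlock]
      · rw [ih (i + 1) (by omega)]
    · rw [pvLoopA, List.drop_eq_nil_of_le (by omega), pvRef]
      simp [h]

-- characterisations used on B's side
theorem pvFind_none {xs : List String} {t : String} {bl : List String}
    (h : pvFind xs t = none) : pvRef t bl xs = xs := by
  induction xs with
  | nil => rw [pvRef]
  | cons x xs ih =>
    simp only [pvFind] at h
    split at h
    · simp at h
    · rw [pvRef]
      simp_all [Option.map_eq_none_iff]

theorem pvSkipF_find (ys : List String) :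
    pvSkipF ys = match pvFind ys "<hashTree/>" with
      | some j => ys.drop (j + 1)
      | none => [] := by
  induction ys with
  | nil => rfl
  | cons y ys ih =>
    rw [pvSkipF]
    simp only [pvFind]
    split
    · simp
    · rw [ih]
      cases h : pvFind ys "<hashTree/>" <;> simp [h]

theorem pvRef_find {xs : List String} {t : String} {i : Nat} (bl : List String)
    (h : pvFind xs t = some i) :
    pvRef t bl xs = xs.take (i + 1) ++ pvBlock bl ((xs.drop i).headD "") ++
      pvRef t bl (pvSkipF (xs.drop (i + 1))) := by
  induction xs generalizing i with
  | nil => simp [pvFind] at h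
  | cons x xs ih =>
    simp only [pvFind] at h
    split at h
    · simp at h
      subst h
      rw [pvRef]
      simp_all
    · cases hx : pvFind xs t with
      | none => simp [hx] at h
      | some k =>
        simp [hx] at h
        subst h
        rw [pvRef]
        simp_all [ih hx]

-- B's loop = out ++ pvRef (given sufficient fuel)
theorem pvLoopB_eq (marker : String) (bl : List String) (f : Nat) :
    ∀ (rest out : List String), rest.length < f →
      pvLoopB marker bl f out rest = out ++ pvRef marker bl rest := by
  induction f with
  | zero => intro rest out hn; omega
  | succ f ih =>
    intro rest out hn
    rw [pvLoopB]
    cases hf : pvFind rest marker with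
    | none => simp [pvFind_none (bl := bl) hf]
    | some i =>
      have hi := pvFind_some_lt hf
      simp only []
      rw [pvRef_find bl hf, pvSkipF_find (rest.drop (i + 1))]
      cases hj : pvFind (rest.drop (i + 1)) "<hashTree/>" with
      | none =>
        simp only [hj]
        rw [ih [] _ (by simp; omega)]
        simp [pvRef, pvBlock]
      | some j =>
        simp only [hj]
        rw [List.drop_drop, show i + 1 + (j + 1) = i + 2 + j from by omega,
          ih (rest.drop (i + 2 + j)) _ (by simp; omega)]
        simp [pvBlock]

-- ===== VERDICT (by name: the statement is the Claim_ definition above) =====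
theorem replace_marker_block_spec : Claim_equal_replace_marker_block := by
  intro lines marker block_lines _
  unfold Spec_replace_marker_block replace_marker_block replace_marker_block_alt
  rw [pvLoopA_eq lines marker block_lines lines.length 0 (by omega),
    pvLoopB_eq marker block_lines (lines.length + 1) lines [] (by omega)]
  simp
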